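-- pv_equiv track=rewrite | github.com/spyoungtech/chunking | chunker/chunker.py | iter_split
-- ===== SOURCE A (Python) =====
-- def _iter(iterable, sentinel):
--     x = iter(iterable)
--     for item in x:
--         yield item
--     yield sentinel
--
-- def iter_split(iterable, sentinel):
--     """
--     Split any arbitrary iterable into list items separated by a sentinel value.
--
--     :param iterable: any iterable
--     :param sentinel: value to split on
--     :yields: chunks
--     """
--     x = _iter(iterable, sentinel)
--     for item in x:
--         chunk = []
--         while item != sentinel:
--             chunk.append(item)
--             item = next(x)
--         yield chunk
-- ===== SOURCE B (Python) =====
-- def iter_split(iterable, sentinel):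
--     """Split any arbitrary iterable into list items separated by a sentinel value."""
--     chunk = []
--     for item in iterable:
--         if item != sentinel:
--             chunk.append(item)
--         else:
--             yield chunk
--             chunk = []
--     yield chunk
-- ===== Notes on version B (the rewrite author's own statement) =====
-- stated objective: simpler
-- what changed: Replaces the sentinel-appending helper generator plus the nested outer-for/inner-while-next() consumption with one flat pass over the iterable that accumulates a single chunk and yields/resets it on each sentinel, with one final yield after the loop; dropping the extra generator layer and per-item next() calls is the constant-factor saving.
import Mathlib
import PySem

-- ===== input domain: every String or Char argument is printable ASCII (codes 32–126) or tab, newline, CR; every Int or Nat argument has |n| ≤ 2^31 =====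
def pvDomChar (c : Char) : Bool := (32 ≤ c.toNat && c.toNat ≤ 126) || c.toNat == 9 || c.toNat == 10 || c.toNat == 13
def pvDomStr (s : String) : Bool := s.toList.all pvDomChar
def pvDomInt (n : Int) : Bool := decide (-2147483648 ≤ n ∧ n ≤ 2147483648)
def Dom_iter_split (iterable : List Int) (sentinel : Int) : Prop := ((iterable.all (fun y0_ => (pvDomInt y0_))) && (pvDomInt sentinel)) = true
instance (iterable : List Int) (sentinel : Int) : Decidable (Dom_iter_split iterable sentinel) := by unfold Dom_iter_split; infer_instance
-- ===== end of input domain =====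

-- B replaces A's sentinel-appending helper generator and nested outer-for/inner-while-next()
-- structure with one flat pass that accumulates a chunk and yields/resets it at each sentinel (objective: simpler).

-- ===== PORT A =====
-- inner `while item != sentinel: chunk.append(item); item = next(x)` loop:
-- returns (the chunk built, the rest of the stream after the stopping sentinel).
-- The [] case is `next` raising StopIteration; unreachable since the stream ends with the sentinel.
def iter_split_collect (xs : List Int) (s : Int) : List Int × List Int :=
  match xs with
  | [] => ([], [])
  | x :: r =>
    if x ≠ s then
      let p := iter_split_collect r s
      (x :: p.1, p.2)
    else ([], r)

theorem iter_split_collect_le (xs : List Int) (s : Int) :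
    (iter_split_collect xs s).2.length ≤ xs.length := by
  induction xs with
  | nil => simp [iter_split_collect]
  | cons x r ih =>
    simp only [iter_split_collect]
    split
    · simpa using Nat.le_succ_of_le ih
    · simp

-- outer `for item in x:` loop of iter_split
def iter_split_outer (xs : List Int) (s : Int) : List (List Int) :=
  match xs with
  | [] => []
  | x :: r =>
    let p := iter_split_collect (x :: r) s
    p.1 :: iter_split_outer p.2 s
termination_by xs.length
decreasing_by
  simp only [iter_split_collect]
  split
  · exact Nat.lt_succ_of_le (iter_split_collect_le r s)
  · simp

-- `x = _iter(iterable, sentinel)` yields the iterable's items then the sentinel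
def iter_split (iterable : List Int) (sentinel : Int) : List (List Int) :=
  iter_split_outer (iterable ++ [sentinel]) sentinel

-- ===== PORT B =====
-- single pass: state = (chunks yielded so far, current chunk); final `yield chunk`
def iter_split_alt (iterable : List Int) (sentinel : Int) : List (List Int) :=
  let st := iterable.foldl
    (fun (st : List (List Int) × List Int) item =>
      if item ≠ sentinel then (st.1, st.2 ++ [item]) else (st.1 ++ [st.2], []))
    ([], [])
  st.1 ++ [st.2]

-- ===== PRECONDITION & SPEC =====
def Spec_iter_split (iterable : List Int) (sentinel : Int) (out : List (List Int)) : Prop := out = iter_split_alt iterable sentinel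
instance (iterable : List Int) (sentinel : Int) (out : List (List Int)) : Decidable (Spec_iter_split iterable sentinel out) := by unfold Spec_iter_split; infer_instance

-- ===== CLAIM (what is proved, stated in full; the proofs are below) =====
def Claim_equal_iter_split : Prop := ∀ (iterable : List Int) (sentinel : Int), Dom_iter_split iterable sentinel → Spec_iter_split iterable sentinel (iter_split iterable sentinel)

-- ===== LEMMAS AND PROOFS =====

-- reference splitter used only by the proofs: (first chunk, remaining chunks)
def pvSplit (xs : List Int) (s : Int) : List Int × List (List Int) :=
  match xs with
  | [] => ([], [])
  | x :: r =>
    let p := pvSplit r s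
    if x = s then ([], p.1 :: p.2) else (x :: p.1, p.2)

theorem pvSplit_foldl (s : Int) (xs : List Int) :
    ∀ (acc : List (List Int)) (chunk : List Int),
    (let st := xs.foldl
        (fun (st : List (List Int) × List Int) item =>
          if item ≠ s then (st.1, st.2 ++ [item]) else (st.1 ++ [st.2], []))
        (acc, chunk)
     st.1 ++ [st.2]) = acc ++ (chunk ++ (pvSplit xs s).1) :: (pvSplit xs s).2 := by
  induction xs with
  | nil => intro acc chunk; simp [pvSplit]
  | cons x r ih =>
    intro acc chunk
    by_cases h : x = s
    · simp only [List.foldl_cons]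
      rw [if_neg (not_not_intro h)]
      refine (ih (acc ++ [chunk]) []).trans ?_
      simp [pvSplit, h]
    · simp only [List.foldl_cons]
      rw [if_pos h]
      refine (ih acc (chunk ++ [x])).trans ?_
      simp [pvSplit, h]

theorem pvSplit_outer (s : Int) (xs : List Int) :
    iter_split_outer (xs ++ [s]) s = (pvSplit xs s).1 :: (pvSplit xs s).2 := by
  induction xs with
  | nil =>
    simp [iter_split_outer, iter_split_collect, pvSplit]
  | cons x r ih =>
    by_cases h : x = s
    · subst h
      rw [List.cons_append, iter_split_outer]
      simp [iter_split_collect, pvSplit, ih]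
    · rw [List.cons_append, iter_split_outer]
      simp only [iter_split_collect, if_pos h]
      rcases hr : r ++ [s] with _ | ⟨y, t⟩
      · exact absurd hr (by simp)
      · rw [hr] at ih
        rw [iter_split_outer] at ih
        simp only [pvSplit, if_neg h]
        obtain ⟨h1, h2⟩ := List.cons.inj ih
        rw [h2, ← h1]

-- ===== VERDICT (by name: the statement is the Claim_ definition above) =====
theorem iter_split_spec : Claim_equal_iter_split := by
  intro iterable sentinel _
  unfold Spec_iter_split iter_split iter_split_alt
  rw [pvSplit_outer, pvSplit_foldl]
  simp
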